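-- pv_equiv track=rewrite | github.com/Hansie91/OpenReg | backend/services/xbrl_parser.py | _find_entry_point
-- ===== SOURCE A (Python) =====
-- from typing import Dict, List, Optional, Any, Tuple
--
-- def _find_entry_point(file_list: List[str]) -> str:
--     """Find the main XSD entry point"""
--     # Look for common patterns
--     for filename in file_list:
--         lower = filename.lower()
--         if any(p in lower for p in ['_entry', 'entrypoint', '-full-', '_full']):
--             if filename.endswith('.xsd'):
--                 return filename
--
--     # Fall back to first XSD in root
--     root_xsds = [f for f in file_list if f.endswith('.xsd') and '/' not in f]
--     if root_xsds:
--         return root_xsds[0]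
--
--     # Any XSD
--     xsds = [f for f in file_list if f.endswith('.xsd')]
--     return xsds[0] if xsds else ""
-- ===== SOURCE B (Python) =====
-- def _find_entry_point(file_list):
--     """Find the main XSD entry point (single pass, three first-hit candidates)."""
--     entry = root = anyx = None
--     for f in file_list:
--         is_xsd = f.endswith('.xsd')
--         low = f.lower()
--         if entry is None and is_xsd and any(p in low for p in ['_entry', 'entrypoint', '-full-', '_full']):
--             entry = f
--         if root is None and is_xsd and '/' not in f:
--             root = f
--         if anyx is None and is_xsd:
--             anyx = f
--     if entry is not None:
--         return entry
--     if root is not None: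
--         return root
--     if anyx is not None:
--         return anyx
--     return ""
-- ===== Notes on version B (the rewrite author's own statement) =====
-- stated objective: faster
-- what changed: Replaces A's three separate traversals (pattern loop, root-xsd filter, any-xsd filter) with one pass that records the first hit of each tier and picks entry > root > any afterwards.
import Mathlib
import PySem

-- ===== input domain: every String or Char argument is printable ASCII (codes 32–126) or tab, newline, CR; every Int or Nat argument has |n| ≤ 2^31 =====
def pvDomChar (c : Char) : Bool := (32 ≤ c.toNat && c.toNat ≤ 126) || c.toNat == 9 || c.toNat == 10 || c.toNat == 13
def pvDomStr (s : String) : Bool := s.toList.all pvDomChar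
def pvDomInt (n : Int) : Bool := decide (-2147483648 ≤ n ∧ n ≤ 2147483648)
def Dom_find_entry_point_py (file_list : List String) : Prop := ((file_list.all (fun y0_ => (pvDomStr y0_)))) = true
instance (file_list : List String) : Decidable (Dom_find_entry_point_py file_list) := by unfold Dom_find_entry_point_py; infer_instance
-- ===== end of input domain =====

-- B replaces A's three separate traversals with a single pass recording the first hit of each tier (entry > root > any).


-- ===== PORT A =====
-- any(p in filename.lower() for p in ['_entry', 'entrypoint', '-full-', '_full'])
def pvMatches (filename : String) : Bool :=
  let lower := PySem.Str.lower filename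
  (["_entry", "entrypoint", "-full-", "_full"] : List String).any (fun p => PySem.Str.isIn p lower)

-- f.endswith('.xsd')
def pvIsXsd (f : String) : Bool := PySem.Str.endswith f ".xsd"

-- '/' not in f
def pvNoSlash (f : String) : Bool := !(PySem.Str.isIn "/" f)

-- the first loop of A: return the first filename matching a pattern AND ending in .xsd
def pvFindEntryLoop : List String → Option String
  | [] => none
  | f :: rest =>
    if pvMatches f then
      (if pvIsXsd f then some f else pvFindEntryLoop rest)
    else pvFindEntryLoop rest

def find_entry_point_py (file_list : List String) : String :=
  match pvFindEntryLoop file_list with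
  | some f => f
  | none =>
    let root_xsds := file_list.filter (fun f => pvIsXsd f && pvNoSlash f)
    match root_xsds with
    | f :: _ => f
    | [] =>
      let xsds := file_list.filter (fun f => pvIsXsd f)
      match xsds with
      | f :: _ => f
      | [] => ""

-- ===== PORT B =====
-- single pass: three first-hit candidates, picked entry > root > any at the end
def find_entry_point_py_alt (file_list : List String) : String :=
  let s := file_list.foldl
    (fun (s : Option String × Option String × Option String) f =>
      let (entry, root, anyx) := s
      let isXsd := pvIsXsd f
      let entry := if entry.isNone && isXsd && pvMatches f then some f else entry
      let root := if root.isNone && isXsd && pvNoSlash f then some f else root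
      let anyx := if anyx.isNone && isXsd then some f else anyx
      (entry, root, anyx))
    (none, none, none)
  match s.1 with
  | some f => f
  | none =>
    match s.2.1 with
    | some f => f
    | none =>
      match s.2.2 with
      | some f => f
      | none => ""

-- ===== PRECONDITION & SPEC =====
def Spec_find_entry_point_py (file_list : List String) (out : String) : Prop := out = find_entry_point_py_alt file_list
instance (file_list : List String) (out : String) : Decidable (Spec_find_entry_point_py file_list out) := by unfold Spec_find_entry_point_py; infer_instance

-- ===== CLAIM (what is proved, stated in full; the proofs are below) =====
def Claim_equal_find_entry_point_py : Prop := ∀ (file_list : List String), Dom_find_entry_point_py file_list → Spec_find_entry_point_py file_list (find_entry_point_py file_list)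

-- ===== LEMMAS AND PROOFS =====

-- the fold of B, from an arbitrary start state, fills each candidate with the first hit of its tier
theorem pv_fold_char (xs : List String) (e r a : Option String) :
    xs.foldl
      (fun (s : Option String × Option String × Option String) f =>
        let (entry, root, anyx) := s
        let isXsd := pvIsXsd f
        let entry := if entry.isNone && isXsd && pvMatches f then some f else entry
        let root := if root.isNone && isXsd && pvNoSlash f then some f else root
        let anyx := if anyx.isNone && isXsd then some f else anyx
        (entry, root, anyx))
      (e, r, a)
    = (e.or (pvFindEntryLoop xs),
       r.or (xs.find? (fun f => pvIsXsd f && pvNoSlash f)),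
       a.or (xs.find? (fun f => pvIsXsd f))) := by
  induction xs generalizing e r a with
  | nil => simp [pvFindEntryLoop]
  | cons f rest ih =>
    rw [List.foldl_cons, ih]
    refine Prod.ext ?_ (Prod.ext ?_ ?_)
    · cases e with
      | some v => simp [Option.some_or, pvFindEntryLoop]
      | none =>
        cases hm : pvMatches f <;> cases hx : pvIsXsd f <;>
          simp [pvFindEntryLoop, hm, hx, Option.none_or, Option.some_or]
    · cases r with
      | some v => simp [Option.some_or]
      | none =>
        cases hx : pvIsXsd f <;> cases hs : pvNoSlash f <;>
          simp [hx, hs, Option.none_or, Option.some_or]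
    · cases a with
      | some v => simp [Option.some_or]
      | none =>
        cases hx : pvIsXsd f <;>
          simp [hx, Option.none_or, Option.some_or]

-- first element of a filtered list = first hit of find?, with a default
theorem pv_match_filter (p : String → Bool) (xs : List String) (d : String) :
    (match xs.filter p with | f :: _ => f | [] => d)
      = (match xs.find? p with | some f => f | none => d) := by
  rw [← List.head?_filter]
  cases xs.filter p <;> rfl

-- ===== VERDICT (by name: the statement is the Claim_ definition above) =====
theorem find_entry_point_py_spec : Claim_equal_find_entry_point_py := by
  intro file_list _
  unfold Spec_find_entry_point_py find_entry_point_py find_entry_point_py_alt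
  rw [pv_fold_char]
  simp only [Option.none_or]
  cases h1 : pvFindEntryLoop file_list with
  | some f => rfl
  | none =>
    rw [pv_match_filter]
    cases h2 : file_list.find? (fun f => pvIsXsd f && pvNoSlash f) with
    | some f => rfl
    | none => rw [pv_match_filter]
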